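-- pv_equiv track=rewrite | github.com/tnorlund/Portfolio | scripts/generate_edge_cases_llm.py | _group_by_pattern
-- ===== SOURCE A (Python) =====
-- from collections import defaultdict
-- from typing import Any, Dict, List, Optional
--
-- def _group_by_pattern(enriched_labels: List[Dict]) -> Dict[str, List[Dict]]:
--     """Group enriched labels by normalized word text."""
--     grouped = defaultdict(list)
--
--     for item in enriched_labels:
--         word_text = item["word_text"].strip() if item["word_text"] else ""
--         if not word_text:
--             continue
--
--         normalized = word_text.upper()
--         grouped[normalized].append(item)
--
--     return dict(grouped)
-- ===== SOURCE B (Python) =====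
-- def _group_by_pattern(enriched_labels):
--     """Group enriched labels by normalized word text (repeated partition of a pending worklist)."""
--     def key(item):
--         w = item["word_text"]
--         return (w or "").strip().upper()
--
--     result = {}
--     pending = [(key(it), it) for it in enriched_labels]
--     while pending:
--         k = pending[0][0]
--         if k:
--             result[k] = [it for kk, it in pending if kk == k]
--         pending = [(kk, it) for kk, it in pending if kk != k]
--     return result
-- ===== Notes on version B (the rewrite author's own statement) =====
-- stated objective: alternative
-- what changed: A builds all groups in one pass by appending each item into a defaultdict; B repeatedly partitions a keyed worklist: it takes the head's key, cuts out that whole group (or all blank-key items) in one filter pass, and repeats on the remainder.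
import Mathlib
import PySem

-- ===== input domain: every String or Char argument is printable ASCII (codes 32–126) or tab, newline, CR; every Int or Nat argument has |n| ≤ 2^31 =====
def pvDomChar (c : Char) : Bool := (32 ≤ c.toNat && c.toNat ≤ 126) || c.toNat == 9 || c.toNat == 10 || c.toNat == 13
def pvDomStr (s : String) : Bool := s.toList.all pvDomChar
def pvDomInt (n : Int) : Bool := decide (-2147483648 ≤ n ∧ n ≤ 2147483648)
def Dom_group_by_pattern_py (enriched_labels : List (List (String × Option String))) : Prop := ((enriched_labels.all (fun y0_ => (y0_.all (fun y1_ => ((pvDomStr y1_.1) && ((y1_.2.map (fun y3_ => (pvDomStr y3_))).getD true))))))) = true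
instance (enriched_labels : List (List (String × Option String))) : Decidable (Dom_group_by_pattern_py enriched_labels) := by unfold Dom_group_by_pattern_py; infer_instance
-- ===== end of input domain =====

-- B replaces A's single-pass defaultdict accumulation by repeated partitioning of a keyed
-- worklist: take the head's key, cut out its whole group (or all blanks) at once, repeat on
-- the remainder; objective: alternative decomposition, not faster.

-- ===== PORT A =====
-- word_text = item["word_text"].strip() if item["word_text"] else ""
-- (the dict item["word_text"] lookup is first-match on the association list; Pre_ guarantees the key is present)
def aWordText (item : List (String × Option String)) : String :=
  match ((PySem.Dict.mk item).get? "word_text").join with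
  | some s => if s = "" then "" else PySem.Str.strip s
  | none => ""

def group_by_pattern_py (enriched_labels : List (List (String × Option String))) : List (String × List (List (String × Option String))) :=
  (enriched_labels.foldl
    (fun (grouped : PySem.Dict String (List (List (String × Option String)))) item =>
      let word_text := aWordText item
      if word_text = "" then grouped
      else
        let normalized := PySem.Str.upper word_text
        grouped.modify normalized [] (fun g => g ++ [item]))
    PySem.Dict.empty).items

-- ===== PORT B =====
-- key(item) = (item["word_text"] or "").strip().upper()
def bKey (item : List (String × Option String)) : String :=
  PySem.Str.upper (PySem.Str.strip (((PySem.Dict.mk item).get? "word_text").join.getD ""))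

-- the while loop: the head's key names the group (or the blanks) removed in this round;
-- Python's two filters run over all of `pending`, whose head has key k, so they split as
-- head :: filter-over-tail / filter-over-tail below
def bGo (pending : List (String × List (String × Option String))) : List (String × List (List (String × Option String))) :=
  match pending with
  | [] => []
  | (k, it) :: t =>
    if k = "" then bGo (t.filter (fun p => p.1 ≠ k))
    else (k, it :: (t.filter (fun p => p.1 = k)).map Prod.snd) :: bGo (t.filter (fun p => p.1 ≠ k))
termination_by pending.length
decreasing_by
  all_goals
    simp only [List.length_cons, List.length_unattach]
    exact Nat.lt_succ_of_le (le_trans (List.length_filter_le _ _) (by simp))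

def group_by_pattern_py_alt (enriched_labels : List (List (String × Option String))) : List (String × List (List (String × Option String))) :=
  bGo (enriched_labels.map (fun it => (bKey it, it)))

-- ===== PRECONDITION & SPEC =====
-- Pre_ excludes items without a "word_text" key, on which Python A raises KeyError.
def Pre_group_by_pattern_py (enriched_labels : List (List (String × Option String))) : Prop :=
  ∀ item ∈ enriched_labels, "word_text" ∈ item.map Prod.fst
instance (enriched_labels : List (List (String × Option String))) : Decidable (Pre_group_by_pattern_py enriched_labels) := by unfold Pre_group_by_pattern_py; infer_instance

def pvWitness_group_by_pattern_py : (List (List (String × Option String))) :=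
  [[("word_text", some " hi ")], [("word_text", none)]]

def Spec_group_by_pattern_py (enriched_labels : List (List (String × Option String))) (out : List (String × List (List (String × Option String)))) : Prop := out = group_by_pattern_py_alt enriched_labels
instance (enriched_labels : List (List (String × Option String))) (out : List (String × List (List (String × Option String)))) : Decidable (Spec_group_by_pattern_py enriched_labels out) := by unfold Spec_group_by_pattern_py; infer_instance

-- ===== CLAIM (what is proved, stated in full; the proofs are below) =====
def Claim_equal_group_by_pattern_py : Prop := ∀ (enriched_labels : List (List (String × Option String))), Dom_group_by_pattern_py enriched_labels → Pre_group_by_pattern_py enriched_labels → Spec_group_by_pattern_py enriched_labels (group_by_pattern_py enriched_labels)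

-- ===== LEMMAS AND PROOFS =====

lemma upper_eq_empty_iff (s : String) : PySem.Str.upper s = "" ↔ s = "" := by
  constructor
  · intro h
    have h' := congrArg String.toList h
    rw [PySem.Str.toList_upper] at h'
    simp [PySem.Chars.upper] at h'
    simpa using h'
  · intro h; subst h; rfl

lemma bKey_eq (item : List (String × Option String)) :
    bKey item = PySem.Str.upper (aWordText item) := by
  unfold bKey aWordText
  cases h : ((PySem.Dict.mk item).get? "word_text").join with
  | none => rfl
  | some s =>
    by_cases hs : s = ""
    · simp [hs]
      rfl
    · simp [hs]

lemma bKey_eq_empty_iff (item : List (String × Option String)) :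
    bKey item = "" ↔ aWordText item = "" := by
  rw [bKey_eq]; exact upper_eq_empty_iff _

-- A's fold with its skip-guard equals the guard-free fold over the filtered list, keyed by bKey
lemma a_fold_eq_filter (ls : List (List (String × Option String)))
    (d : PySem.Dict String (List (List (String × Option String)))) :
    ls.foldl
      (fun grouped item =>
        let word_text := aWordText item
        if word_text = "" then grouped
        else
          let normalized := PySem.Str.upper word_text
          grouped.modify normalized [] (fun g => g ++ [item])) d
    = (ls.filter (fun it => bKey it != "")).foldl
        (fun grouped item => grouped.modify (bKey item) [] (fun g => g ++ [item])) d := by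
  induction ls generalizing d with
  | nil => rfl
  | cons x xs ih =>
    simp only [List.foldl_cons]
    by_cases h : aWordText x = ""
    · rw [List.filter_cons_of_neg (by simp [bKey_eq_empty_iff, h])]
      simp [h, ih]
    · rw [List.filter_cons_of_pos (by simp [bKey_eq_empty_iff, h])]
      simp only [List.foldl_cons]
      rw [if_neg h, ← bKey_eq]
      exact ih _

-- elements equal to an element already in the set are no-ops of Set.add
lemma foldl_add_filter_ne {α : Type} [DecidableEq α] (l : List α) (s : PySem.Set α) (k : α)
    (hk : k ∈ s) :
    l.foldl PySem.Set.add s = (l.filter (fun x => x ≠ k)).foldl PySem.Set.add s := by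
  induction l generalizing s with
  | nil => rfl
  | cons x t ih =>
    by_cases hx : x = k
    · subst hx
      have : PySem.Set.add s x = s := by
        simp [PySem.Set.add, PySem.Set.contains, hk]
      simp [this, ih s hk]
    · rw [List.filter_cons_of_pos (by simp [hx])]
      simp only [List.foldl_cons]
      exact ih _ ((PySem.Set.mem_add _ _ _).mpr (Or.inl hk))

lemma foldl_add_cons {α : Type} [DecidableEq α] (l : List α) (k : α) (s : List α)
    (h : ∀ x ∈ l, x ≠ k) :
    l.foldl PySem.Set.add (k :: s) = k :: l.foldl PySem.Set.add s := by
  induction l generalizing s with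
  | nil => rfl
  | cons x t ih =>
    have hx : x ≠ k := h x (by simp)
    have hadd : PySem.Set.add (k :: s) x = k :: PySem.Set.add s x := by
      simp [PySem.Set.add, PySem.Set.contains, hx]
      by_cases hm : x ∈ s <;> simp [hm]
    rw [List.foldl_cons, List.foldl_cons, hadd]
    exact ih _ (fun y hy => h y (by simp [hy]))

lemma ofList_cons_filter {α : Type} [DecidableEq α] (k : α) (l : List α) :
    PySem.Set.ofList (k :: l) = k :: PySem.Set.ofList (l.filter (fun x => x ≠ k)) := by
  have h1 : PySem.Set.ofList (k :: l) = l.foldl PySem.Set.add [k] := rfl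
  rw [h1, foldl_add_filter_ne l [k] k (by simp),
      foldl_add_cons _ k [] (fun x hx => by simpa using (List.of_mem_filter hx))]
  rfl

-- characterization of B's partition loop
lemma bGo_eq (pending : List (String × List (String × Option String))) :
    bGo pending
      = (PySem.Set.ofList ((pending.map Prod.fst).filter (fun x => x ≠ ""))).map
          (fun k => (k, (pending.filter (fun p => p.1 = k)).map Prod.snd)) := by
  induction hn : pending.length using Nat.strong_induction_on generalizing pending with
  | _ n ih =>
  cases pending with
  | nil => simp [bGo]
  | cons hd t =>
    obtain ⟨k, it⟩ := hd
    subst hn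
    have hlt : (t.filter (fun p => p.1 ≠ k)).length < ((k, it) :: t).length := by
      simp only [List.length_cons]
      exact Nat.lt_succ_of_le (List.length_filter_le _ _)
    rw [bGo]
    by_cases hk : k = ""
    · subst hk
      rw [if_pos rfl, ih _ hlt _ rfl]
      have hkeys : ((List.map Prod.fst ((("", it)) :: t)).filter (fun x => decide (x ≠ ""))) = ((t.map Prod.fst).filter (fun x => decide (x ≠ ""))) := by
        simp
      have hkeys2 : (((t.filter (fun p => decide (p.1 ≠ ""))).map Prod.fst).filter (fun x => decide (x ≠ ""))) = ((t.map Prod.fst).filter (fun x => decide (x ≠ ""))) := by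
        rw [List.filter_map, List.filter_filter, List.filter_map]
        congr 1
        apply List.filter_congr
        intro x _
        simp
      rw [hkeys, hkeys2]
      apply List.map_congr_left
      intro k' hk'
      have hk'ne : k' ≠ "" := by
        have := (PySem.Set.mem_ofList _ _).mp hk'
        simpa using (List.mem_filter.mp this).2
      congr 1
      rw [List.filter_filter, List.filter_cons_of_neg (by simpa using Ne.symm hk'ne)]
      congr 1
      apply List.filter_congr
      intro x _
      by_cases hx : x.1 = k' <;> simp [hx, hk'ne]
    · rw [if_neg hk, ih _ hlt _ rfl]
      have hkeys : ((List.map Prod.fst ((k, it) :: t)).filter (fun x => decide (x ≠ ""))) = k :: ((t.map Prod.fst).filter (fun x => decide (x ≠ ""))) := by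
        rw [List.map_cons, List.filter_cons_of_pos (by simpa using hk)]
      rw [hkeys, ofList_cons_filter]
      have hkeys2 : (((t.filter (fun p => decide (p.1 ≠ k))).map Prod.fst).filter (fun x => decide (x ≠ ""))) = (((t.map Prod.fst).filter (fun x => decide (x ≠ ""))).filter (fun x => decide (x ≠ k))) := by
        rw [List.filter_map, List.filter_filter, List.filter_filter, List.filter_map]
        congr 1
        apply List.filter_congr
        intro x _
        simp [Bool.and_comm]
      rw [hkeys2]
      rw [List.map_cons]
      congr 1
      · rw [List.filter_cons_of_pos (by simp)]
        simp
      · apply List.map_congr_left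
        intro k' hk'
        have hmem := (PySem.Set.mem_ofList _ _).mp hk'
        have hk'k : k' ≠ k := by simpa using (List.mem_filter.mp hmem).2
        congr 1
        rw [List.filter_cons_of_neg (by simpa using Ne.symm hk'k), List.filter_filter]
        congr 1
        apply List.filter_congr
        intro x _
        by_cases hx : x.1 = k' <;> simp [hx, hk'k]

-- ===== VERDICT (by name: the statement is the Claim_ definition above) =====
set_option maxHeartbeats 1000000 in
theorem group_by_pattern_py_spec : Claim_equal_group_by_pattern_py := by
  intro ls _ _
  unfold Spec_group_by_pattern_py group_by_pattern_py group_by_pattern_py_alt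
  rw [a_fold_eq_filter, bGo_eq]
  set ls' := ls.filter (fun it => bKey it != "") with hls'
  set d := ls'.foldl (fun grouped item => grouped.modify (bKey item) [] (fun g => g ++ [item]))
      (PySem.Dict.empty : PySem.Dict String (List (List (String × Option String)))) with hd
  have hkeys : d.keys = PySem.Set.ofList (ls'.map bKey) := by
    rw [hd, PySem.Dict.keys_foldl_modify_key]
    simp [PySem.Set.update_nil_left]
  have hnd : d.keys.Nodup := by
    rw [hd]
    exact PySem.Dict.nodup_keys_foldl_modify_key _ _ _ _ _ (by simp)
  rw [PySem.Dict.items_eq_map_keys d hnd [], hkeys]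
  have hK : ls'.map bKey = ((ls.map (fun it => (bKey it, it))).map Prod.fst).filter (fun x => decide (x ≠ "")) := by
    rw [hls', List.map_map, List.filter_map]
    exact congrArg (List.map _)
      (List.filter_congr (fun x _ => by simp [Function.comp_def, bne, Bool.beq_eq_decide_eq]))
  rw [← hK]
  apply List.map_congr_left
  intro k hk
  have hkne : k ≠ "" := by
    rcases (PySem.Set.mem_ofList _ _).mp hk with hmem
    rcases List.mem_map.mp hmem with ⟨it, hit, rfl⟩
    have := List.of_mem_filter hit
    simpa using this
  have hgetD : d.getD k [] = ls'.filter (fun it => bKey it == k) := by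
    have hfold : (ls'.foldl (fun grouped item => grouped.modify (bKey item) [] (fun g => g ++ [item])) (PySem.Dict.empty : PySem.Dict String (List (List (String × Option String)))))
        = ((ls'.map (fun it => (bKey it, it))).foldl (fun d p => d.modify p.1 [] (fun g => g ++ [p.2])) PySem.Dict.empty) := by
      rw [List.foldl_map]
    rw [hd, hfold, PySem.Dict.getD_foldl_modify_append]
    simp [List.filter_map, Function.comp_def]
  rw [hgetD]
  refine congrArg (Prod.mk k) ?_
  have hB : ((ls.map (fun it => (bKey it, it))).filter (fun p => decide (p.1 = k))).map Prod.snd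
      = ls.filter (fun it => decide (bKey it = k)) := by
    rw [List.filter_map, List.map_map,
        show (Prod.snd ∘ fun it : List (String × Option String) => (bKey it, it)) = id from rfl,
        List.map_id]
    exact List.filter_congr (fun x _ => by simp)
  rw [hB, hls', List.filter_filter]
  apply List.filter_congr
  intro it _
  by_cases hbk : bKey it = k
  · simp [hbk, hkne, bne, Bool.beq_eq_decide_eq]
  · simp [hbk, bne, Bool.beq_eq_decide_eq]
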